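-- pv_equiv track=rewrite | github.com/dvsolutionshn/dvsolutions-erp | core/access.py | permiso_contabilidad_desde_ruta
-- ===== SOURCE A (Python) =====
-- CONTABILIDAD_PERMISSION_MAP = [
--     ("configuracion/", "puede_contabilidad"),
--     ("periodos/", "puede_contabilidad"),
--     ("clasificaciones-compras/", "puede_contabilidad"),
--     ("bancos/", "puede_contabilidad"),
--     ("cuentas/", "puede_catalogo_cuentas"),
--     ("asientos/", "puede_contabilidad"),
--     ("reportes/", "puede_reportes_contables"),
-- ]
--
-- def permiso_contabilidad_desde_ruta(path_suffix):
--     if not path_suffix: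
--         return None
--     normalized = path_suffix if path_suffix.endswith("/") else f"{path_suffix}/"
--     if normalized.startswith(tuple(str(i) for i in range(10))):
--         return "puede_contabilidad"
--     for prefix, permiso in CONTABILIDAD_PERMISSION_MAP:
--         if normalized.startswith(prefix):
--             return permiso
--     return None
-- ===== SOURCE B (Python) =====
-- PERMISSION_BY_SEGMENT = {
--     "configuracion": "puede_contabilidad",
--     "periodos": "puede_contabilidad",
--     "clasificaciones-compras": "puede_contabilidad",
--     "bancos": "puede_contabilidad",
--     "cuentas": "puede_catalogo_cuentas",
--     "asientos": "puede_contabilidad",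
--     "reportes": "puede_reportes_contables",
-- }
--
-- def permiso_contabilidad_desde_ruta(path_suffix):
--     if not path_suffix:
--         return None
--     if path_suffix[0] in "0123456789":
--         return "puede_contabilidad"
--     return PERMISSION_BY_SEGMENT.get(path_suffix.partition("/")[0])
-- ===== Notes on version B (the rewrite author's own statement) =====
-- stated objective: idiomatic
-- what changed: B drops the trailing-slash normalization and the linear startswith scan entirely: it tests the first character against the digit string directly and looks up the first path segment (str.partition('/')[0]) in a precomputed segment-to-permission dict.
import Mathlib
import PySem

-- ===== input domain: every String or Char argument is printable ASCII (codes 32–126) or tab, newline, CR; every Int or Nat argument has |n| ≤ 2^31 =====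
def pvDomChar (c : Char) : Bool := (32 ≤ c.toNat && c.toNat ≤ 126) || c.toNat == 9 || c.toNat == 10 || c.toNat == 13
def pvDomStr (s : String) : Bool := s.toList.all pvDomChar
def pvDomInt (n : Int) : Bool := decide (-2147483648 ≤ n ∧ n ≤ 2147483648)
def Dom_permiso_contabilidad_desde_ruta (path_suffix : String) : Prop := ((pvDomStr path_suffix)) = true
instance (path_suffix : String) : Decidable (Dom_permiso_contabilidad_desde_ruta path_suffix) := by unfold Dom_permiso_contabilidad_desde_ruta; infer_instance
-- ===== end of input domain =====

-- B drops A's trailing-slash normalization and linear startswith scan: it tests the first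
-- character directly and looks up the first path segment in a precomputed dict (objective: idiomatic).

-- ===== PORT A =====
def pvContabilidadPermissionMap : List (List Char × String) :=
  [("configuracion/".toList, "puede_contabilidad"),
   ("periodos/".toList, "puede_contabilidad"),
   ("clasificaciones-compras/".toList, "puede_contabilidad"),
   ("bancos/".toList, "puede_contabilidad"),
   ("cuentas/".toList, "puede_catalogo_cuentas"),
   ("asientos/".toList, "puede_contabilidad"),
   ("reportes/".toList, "puede_reportes_contables")]

-- the 'for prefix, permiso in …: if normalized.startswith(prefix): return permiso' loop
def pvScanA : List (List Char × String) → List Char → Option String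
  | [], _ => none
  | (p, perm) :: rest, n =>
      if PySem.Chars.startswith n p then some perm else pvScanA rest n

def permiso_contabilidad_desde_ruta (path_suffix : String) : Option String :=
  let l := path_suffix.toList
  if l = [] then none
  else
    let normalized := if PySem.Chars.endswith l ['/'] then l else l ++ ['/']
    -- startswith(tuple(str(i) for i in range(10))) = any of the digit strings is a prefix
    if ((PySem.List.pyRange 0 10 1).map PySem.Int.toChars).any
         (fun d => PySem.Chars.startswith normalized d) then
      some "puede_contabilidad"
    else pvScanA pvContabilidadPermissionMap normalized

-- ===== PORT B =====
def pvPermissionBySegment : PySem.Dict (List Char) String :=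
  PySem.Dict.ofList
    [("configuracion".toList, "puede_contabilidad"),
     ("periodos".toList, "puede_contabilidad"),
     ("clasificaciones-compras".toList, "puede_contabilidad"),
     ("bancos".toList, "puede_contabilidad"),
     ("cuentas".toList, "puede_catalogo_cuentas"),
     ("asientos".toList, "puede_contabilidad"),
     ("reportes".toList, "puede_reportes_contables")]

-- str.partition(sep)[0]: the characters before the first occurrence of sep (exact for a
-- one-character separator: everything up to the first '/', the whole string if none).
def pvPartitionFst (l : List Char) : List Char := l.takeWhile (· ≠ '/')

def permiso_contabilidad_desde_ruta_alt (path_suffix : String) : Option String :=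
  match path_suffix.toList with
  | [] => none                                   -- "if not path_suffix: return None"
  | c :: rest =>                                  -- path_suffix[0] = c (string known nonempty)
      if PySem.Chars.isIn [c] "0123456789".toList then some "puede_contabilidad"
      else pvPermissionBySegment.get? (pvPartitionFst (c :: rest))

-- ===== PRECONDITION & SPEC =====
def Spec_permiso_contabilidad_desde_ruta (path_suffix : String) (out : Option String) : Prop := out = permiso_contabilidad_desde_ruta_alt path_suffix
instance (path_suffix : String) (out : Option String) : Decidable (Spec_permiso_contabilidad_desde_ruta path_suffix out) := by unfold Spec_permiso_contabilidad_desde_ruta; infer_instance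

-- ===== CLAIM (what is proved, stated in full; the proofs are below) =====
def Claim_equal_permiso_contabilidad_desde_ruta : Prop := ∀ (path_suffix : String), Dom_permiso_contabilidad_desde_ruta path_suffix → Spec_permiso_contabilidad_desde_ruta path_suffix (permiso_contabilidad_desde_ruta path_suffix)

-- ===== LEMMAS AND PROOFS =====

-- Appending a trailing '/' does not change the first segment.
lemma pvTakeWhile_append_slash (l : List Char) :
    (l ++ ['/']).takeWhile (· ≠ '/') = l.takeWhile (· ≠ '/') := by
  induction l with
  | nil => simp [List.takeWhile]
  | cons c t ih =>
      by_cases hc : c = '/'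
      · subst hc; simp [List.takeWhile]
      · rw [List.cons_append, List.takeWhile_cons, List.takeWhile_cons, ih]

-- A prefix "k/" (k slash-free) matches exactly when the first segment of n equals k.
lemma pvStartswith_key_iff (k : List Char) : ∀ (n : List Char), ('/' : Char) ∉ k → ('/' : Char) ∈ n →
    ((k ++ ['/']).isPrefixOf n = true ↔ n.takeWhile (· ≠ '/') = k) := by
  induction k with
  | nil =>
      intro n _ hn
      cases n with
      | nil => simp at hn
      | cons c t =>
          by_cases hc : c = '/'
          · subst hc; simp [List.isPrefixOf]
          · simp [List.isPrefixOf, hc, Ne.symm hc]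
  | cons a k' ih =>
      intro n hk hn
      have ha : a ≠ '/' := fun h => hk (by simp [h])
      have hk' : ('/' : Char) ∉ k' := fun h => hk (by simp [h])
      cases n with
      | nil => simp at hn
      | cons c t =>
          by_cases hc : c = a
          · subst hc
            have ht : ('/' : Char) ∈ t := by
              rcases List.mem_cons.mp hn with h | h
              · exact absurd h.symm ha
              · exact h
            simp only [List.cons_append, List.isPrefixOf, beq_self_eq_true, Bool.true_and,
              List.takeWhile_cons]
            rw [if_pos (by simp [ha] : decide (c ≠ '/') = true)]
            rw [ih t hk' ht]
            simp
          · have hba : (a == c) = false := by simp [Ne.symm hc]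
            simp only [List.cons_append, List.isPrefixOf, hba, Bool.false_and,
              Bool.false_eq_true, false_iff, List.takeWhile_cons]
            intro hEq
            split_ifs at hEq with h2
            all_goals simp_all

lemma pvStartswith_key_eq (k n : List Char) (hk : ('/' : Char) ∉ k) (hn : ('/' : Char) ∈ n) :
    PySem.Chars.startswith n (k ++ ['/']) = decide (n.takeWhile (· ≠ '/') = k) := by
  rw [Bool.eq_iff_iff]
  simp only [PySem.Chars.startswith, decide_eq_true_eq]
  exact pvStartswith_key_iff k n hk hn

-- The two digit tests agree on any nonempty list.
lemma pvDigit_eq (c : Char) (t : List Char) :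
    (((PySem.List.pyRange 0 10 1).map PySem.Int.toChars).any
        (fun d => PySem.Chars.startswith (c :: t) d))
      = PySem.Chars.isIn [c] "0123456789".toList := by
  have hr : (PySem.List.pyRange 0 10 1).map PySem.Int.toChars
      = [['0'],['1'],['2'],['3'],['4'],['5'],['6'],['7'],['8'],['9']] := by decide
  have hdl : "0123456789".toList = ['0','1','2','3','4','5','6','7','8','9'] := by decide
  rw [hr, hdl, Bool.eq_iff_iff, PySem.Chars.isIn_iff_infix, List.singleton_infix_iff]
  simp only [List.any_cons, List.any_nil, Bool.or_eq_true, Bool.or_false,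
    PySem.Chars.startswith, List.isPrefixOf,
    Bool.and_true, beq_iff_eq, List.mem_cons, List.not_mem_nil, or_false]
  constructor <;> (intro h; rcases h with h|h|h|h|h|h|h|h|h|h <;> (subst h; simp))

-- A's scan over the slash-suffixed prefixes equals B's dict lookup of the first segment.
lemma pvScan_eq_dict (n : List Char) (hn : ('/' : Char) ∈ n) :
    pvScanA pvContabilidadPermissionMap n
      = pvPermissionBySegment.get? (n.takeWhile (· ≠ '/')) := by
  have hd : pvPermissionBySegment = PySem.Dict.mk
      [("configuracion".toList, "puede_contabilidad"),
       ("periodos".toList, "puede_contabilidad"),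
       ("clasificaciones-compras".toList, "puede_contabilidad"),
       ("bancos".toList, "puede_contabilidad"),
       ("cuentas".toList, "puede_catalogo_cuentas"),
       ("asientos".toList, "puede_contabilidad"),
       ("reportes".toList, "puede_reportes_contables")] := by decide
  set seg := n.takeWhile (· ≠ '/') with hseg
  have key : ∀ (k : List Char), ('/' : Char) ∉ k →
      PySem.Chars.startswith n (k ++ ['/']) = (k == seg) := by
    intro k hk
    rw [pvStartswith_key_eq k n hk hn, Bool.eq_iff_iff]
    simp only [decide_eq_true_eq, beq_iff_eq]
    exact eq_comm
  simp only [pvScanA, pvContabilidadPermissionMap, hd, PySem.Dict.get?_mk_cons]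
  rw [show ("configuracion/".toList) = "configuracion".toList ++ ['/'] from by decide,
      show ("periodos/".toList) = "periodos".toList ++ ['/'] from by decide,
      show ("clasificaciones-compras/".toList) = "clasificaciones-compras".toList ++ ['/'] from by decide,
      show ("bancos/".toList) = "bancos".toList ++ ['/'] from by decide,
      show ("cuentas/".toList) = "cuentas".toList ++ ['/'] from by decide,
      show ("asientos/".toList) = "asientos".toList ++ ['/'] from by decide,
      show ("reportes/".toList) = "reportes".toList ++ ['/'] from by decide,
      key _ (by decide), key _ (by decide), key _ (by decide), key _ (by decide),
      key _ (by decide), key _ (by decide), key _ (by decide)]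
  split_ifs <;> rfl

-- ===== VERDICT (by name: the statement is the Claim_ definition above) =====
theorem permiso_contabilidad_desde_ruta_spec : Claim_equal_permiso_contabilidad_desde_ruta := by
  intro path _
  unfold Spec_permiso_contabilidad_desde_ruta
  unfold permiso_contabilidad_desde_ruta permiso_contabilidad_desde_ruta_alt
  cases hl : path.toList with
  | nil => simp
  | cons c t =>
    simp only [if_neg, List.cons_ne_nil, not_false_eq_true]
    -- the normalized list: head is still c, and it contains a '/'
    by_cases he : PySem.Chars.endswith (c :: t) ['/'] = true
    · have hmem : ('/' : Char) ∈ c :: t := by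
        rcases (PySem.Chars.endswith_iff _ _).mp he with ⟨pre, hpre⟩
        rw [← hpre]; simp
      simp only [if_pos he]
      rw [pvDigit_eq c t]
      by_cases hdig : PySem.Chars.isIn [c] "0123456789".toList = true
      · rw [if_pos hdig, if_pos hdig]
      · rw [if_neg hdig, if_neg hdig, pvScan_eq_dict _ hmem, pvPartitionFst]
    · simp only [if_neg he, List.cons_append]
      rw [pvDigit_eq c (t ++ ['/'])]
      by_cases hdig : PySem.Chars.isIn [c] "0123456789".toList = true
      · rw [if_pos hdig, if_pos hdig]
      · rw [if_neg hdig, if_neg hdig,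
            pvScan_eq_dict (c :: (t ++ ['/'])) (by simp), pvPartitionFst,
            show c :: (t ++ ['/']) = (c :: t) ++ ['/'] by simp,
            pvTakeWhile_append_slash]
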